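-- pv_equiv track=rewrite | github.com/g2hsec/bundleInspector | src/bundleInspector/rules/detectors/debug.py | _check_logged_data
-- ===== SOURCE A (Python) =====
-- def _check_logged_data(arguments: list) -> bool:
--     """Check if logged data might be sensitive."""
--     sensitive_keywords = [
--         "password", "token", "secret", "key", "auth",
--         "credential", "session", "cookie", "bearer",
--     ]
--
--     for arg in arguments:
--         # Check literals
--         if arg.get("type") == "Literal":
--             value = str(arg.get("value", "")).lower()
--             if any(kw in value for kw in sensitive_keywords):
--                 return True
--
--         # Check identifiers
--         if arg.get("type") == "Identifier":
--             name = arg.get("name", "").lower()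
--             if any(kw in name for kw in sensitive_keywords):
--                 return True
--
--     return False
-- ===== SOURCE B (Python) =====
-- _SENSITIVE = (
--     "password", "token", "secret", "key", "auth",
--     "credential", "session", "cookie", "bearer",
-- )
--
-- # First-character dispatch table: keyword lists indexed by their first letter,
-- # so the sweep below only tries keywords that can possibly match at a position.
-- _BY_FIRST = {}
-- for _kw in _SENSITIVE:
--     _BY_FIRST.setdefault(_kw[0], []).append(_kw)
--
--
-- def _contains_sensitive(text):
--     """Single left-to-right sweep: at each position try only the keywords
--     whose first character matches, via an anchored startswith."""
--     for i, ch in enumerate(text):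
--         for kw in _BY_FIRST.get(ch, ()):
--             if text.startswith(kw, i):
--                 return True
--     return False
--
--
-- def _check_logged_data(arguments: list) -> bool:
--     """Check if logged data might be sensitive."""
--     for arg in arguments:
--         t = arg.get("type")
--         if t == "Literal":
--             text = str(arg.get("value", "")).lower()
--         elif t == "Identifier":
--             text = arg.get("name", "").lower()
--         else:
--             continue
--         if _contains_sensitive(text):
--             return True
--     return False
-- ===== Notes on version B (the rewrite author's own statement) =====
-- stated objective: alternative
-- what changed: B replaces A's nine independent substring scans ('kw in text') with one left-to-right sweep over the text positions using a first-character dispatch table (dict from first letter to its keywords) and anchored startswith checks, so the text is traversed once and at each position only the keywords that can match there are tried.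
import Mathlib
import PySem

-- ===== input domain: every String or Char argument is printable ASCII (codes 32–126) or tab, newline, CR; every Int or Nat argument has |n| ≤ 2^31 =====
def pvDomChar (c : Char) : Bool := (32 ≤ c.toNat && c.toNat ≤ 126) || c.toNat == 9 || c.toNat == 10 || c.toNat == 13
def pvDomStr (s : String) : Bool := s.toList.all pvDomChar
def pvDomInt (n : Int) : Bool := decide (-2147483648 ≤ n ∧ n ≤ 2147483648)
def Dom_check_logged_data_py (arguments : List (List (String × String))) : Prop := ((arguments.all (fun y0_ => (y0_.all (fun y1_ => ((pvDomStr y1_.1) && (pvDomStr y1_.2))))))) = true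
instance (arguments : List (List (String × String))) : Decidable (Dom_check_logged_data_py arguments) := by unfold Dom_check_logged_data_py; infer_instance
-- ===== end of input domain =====

-- B replaces A's nine independent substring scans with one left-to-right sweep over the text
-- using a first-character dispatch table and anchored prefix checks; objective: alternative.

-- ===== PORT A =====
def pvKeywords : List String :=
  ["password", "token", "secret", "key", "auth",
   "credential", "session", "cookie", "bearer"]

def check_logged_data_py : List (List (String × String)) → Bool
  | [] => false
  | arg :: rest =>
    let d := PySem.Dict.mk arg
    if (d.get? "type" == some "Literal") &&
       pvKeywords.any (fun kw => PySem.Str.isIn kw (PySem.Str.lower (d.getD "value" ""))) then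
      true
    else if (d.get? "type" == some "Identifier") &&
       pvKeywords.any (fun kw => PySem.Str.isIn kw (PySem.Str.lower (d.getD "name" ""))) then
      true
    else
      check_logged_data_py rest

-- ===== PORT B =====
-- Source B's module-level table: _BY_FIRST = {first letter -> its keywords}, built by setdefault+append
-- (Dict.insert overwrites in place, which is exactly setdefault+append's insertion-order behaviour;
--  kw[0] is ported as the head of kw.toList — every keyword is nonempty, so the [] branch is dead).
def pvByFirst : PySem.Dict Char (List String) :=
  pvKeywords.foldl (fun d kw =>
    match kw.toList with
    | [] => d
    | c :: _ => d.insert c (d.getD c [] ++ [kw])) PySem.Dict.empty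

-- Source B's _contains_sensitive: the loop over positions i becomes structural recursion over the
-- suffixes of the char list; text.startswith(kw, i) is exactly kw.toList.isPrefixOf (suffix at i).
def pvContainsSensitive : List Char → Bool
  | [] => false
  | c :: rest =>
    if (pvByFirst.getD c []).any (fun kw => kw.toList.isPrefixOf (c :: rest)) then true
    else pvContainsSensitive rest

def check_logged_data_py_alt : List (List (String × String)) → Bool
  | [] => false
  | arg :: rest =>
    let d := PySem.Dict.mk arg
    let t := d.get? "type"
    if t == some "Literal" then
      if pvContainsSensitive (PySem.Str.lower (d.getD "value" "")).toList then true
      else check_logged_data_py_alt rest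
    else if t == some "Identifier" then
      if pvContainsSensitive (PySem.Str.lower (d.getD "name" "")).toList then true
      else check_logged_data_py_alt rest
    else check_logged_data_py_alt rest

-- ===== PRECONDITION & SPEC =====
def Spec_check_logged_data_py (arguments : List (List (String × String))) (out : Bool) : Prop := out = check_logged_data_py_alt arguments
instance (arguments : List (List (String × String))) (out : Bool) : Decidable (Spec_check_logged_data_py arguments out) := by unfold Spec_check_logged_data_py; infer_instance

-- ===== CLAIM (what is proved, stated in full; the proofs are below) =====
def Claim_equal_check_logged_data_py : Prop := ∀ (arguments : List (List (String × String))), Dom_check_logged_data_py arguments → Spec_check_logged_data_py arguments (check_logged_data_py arguments)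

-- ===== LEMMAS AND PROOFS =====

-- the first-character dispatch is lossless: at a position starting with c, scanning only the
-- keywords filed under c is the same as scanning all nine keywords
theorem pv_hit_eq (c : Char) (l : List Char) :
    (pvByFirst.getD c []).any (fun kw => kw.toList.isPrefixOf (c :: l))
      = pvKeywords.any (fun kw => kw.toList.isPrefixOf (c :: l)) := by
  have hB : pvByFirst = PySem.Dict.mk
      [('p',["password"]),('t',["token"]),('s',["secret","session"]),('k',["key"]),
       ('a',["auth"]),('c',["credential","cookie"]),('b',["bearer"])] := by decide
  by_cases hp : c = 'p'; · subst hp; simp [hB, pvKeywords, List.isPrefixOf, PySem.Dict.getD, PySem.Dict.get?_mk_cons]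
  by_cases ht : c = 't'; · subst ht; simp [hB, pvKeywords, List.isPrefixOf, PySem.Dict.getD, PySem.Dict.get?_mk_cons]
  by_cases hs : c = 's'; · subst hs; simp [hB, pvKeywords, List.isPrefixOf, PySem.Dict.getD, PySem.Dict.get?_mk_cons]
  by_cases hk : c = 'k'; · subst hk; simp [hB, pvKeywords, List.isPrefixOf, PySem.Dict.getD, PySem.Dict.get?_mk_cons]
  by_cases ha : c = 'a'; · subst ha; simp [hB, pvKeywords, List.isPrefixOf, PySem.Dict.getD, PySem.Dict.get?_mk_cons]
  by_cases hc : c = 'c'; · subst hc; simp [hB, pvKeywords, List.isPrefixOf, PySem.Dict.getD, PySem.Dict.get?_mk_cons]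
  by_cases hb : c = 'b'; · subst hb; simp [hB, pvKeywords, List.isPrefixOf, PySem.Dict.getD, PySem.Dict.get?_mk_cons]
  simp [hB, pvKeywords, List.isPrefixOf, PySem.Dict.getD, PySem.Dict.get?,
    beq_iff_eq, Ne.symm hp, Ne.symm ht, Ne.symm hs, Ne.symm hk,
    Ne.symm ha, Ne.symm hc, Ne.symm hb]

-- the position sweep finds a keyword iff some keyword is an infix of the text
theorem pv_scan_eq (cs : List Char) :
    pvContainsSensitive cs = pvKeywords.any (fun kw => decide (kw.toList <:+: cs)) := by
  induction cs with
  | nil => decide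
  | cons c rest ih =>
    simp only [pvContainsSensitive]
    rw [pv_hit_eq, ih, Bool.eq_iff_iff]
    simp only [Bool.if_true_left, Bool.or_eq_true, List.any_eq_true, decide_eq_true_eq,
      List.isPrefixOf_iff_prefix, List.infix_cons_iff]
    constructor
    · rintro (⟨x, hx, h⟩ | ⟨x, hx, h⟩)
      exacts [⟨x, hx, Or.inl h⟩, ⟨x, hx, Or.inr h⟩]
    · rintro ⟨x, hx, h | h⟩
      exacts [Or.inl ⟨x, hx, h⟩, Or.inr ⟨x, hx, h⟩]

-- per candidate text, B's sweep agrees with A's `any(kw in text …)`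
theorem pv_scan_isIn (s : String) :
    pvContainsSensitive s.toList = pvKeywords.any (fun kw => PySem.Str.isIn kw s) := by
  rw [pv_scan_eq, Bool.eq_iff_iff]
  simp only [List.any_eq_true, decide_eq_true_eq, PySem.Str.isIn_iff_infix]

-- the two argument loops agree (unconditionally): per argument, both branches compare the same
-- candidate text, and pv_scan_isIn equates the two inner mechanisms
theorem pv_AB (arguments : List (List (String × String))) :
    check_logged_data_py arguments = check_logged_data_py_alt arguments := by
  induction arguments with
  | nil => rfl
  | cons arg rest ih =>
    simp only [check_logged_data_py, check_logged_data_py_alt, pv_scan_isIn]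
    by_cases h1 : (PySem.Dict.mk arg).get? "type" = some "Literal"
    · have e2 : (PySem.Dict.mk arg).get? "type" ≠ some "Identifier" := by simp [h1]
      simp only [h1, beq_self_eq_true, Bool.true_and, beq_iff_eq]
      split <;> simp_all
    · by_cases h2 : (PySem.Dict.mk arg).get? "type" = some "Identifier"
      · have e1 : ((PySem.Dict.mk arg).get? "type" == some "Literal") = false := by simp [h1]
        simp only [h2, beq_self_eq_true, Bool.true_and, ih]
        split <;> simp_all
      · have e1 : ((PySem.Dict.mk arg).get? "type" == some "Literal") = false := by simp [h1]
        have e2 : ((PySem.Dict.mk arg).get? "type" == some "Identifier") = false := by simp [h2]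
        simp only [e1, e2, Bool.false_and, Bool.false_eq_true, if_false, ih]

theorem check_logged_data_py_spec : Claim_equal_check_logged_data_py := by
  intro arguments _
  unfold Spec_check_logged_data_py
  exact pv_AB arguments
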